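-- pv_equiv track=rewrite | github.com/EmilioGalimberti/finalAED | practico/PARCIAL 2/90747_Galimberti_Emilio.py | problema_4
-- ===== SOURCE A (Python) =====
-- def es_a(caracter):
--     return caracter in "aA"
--
-- def es_n(caracter):
--     return caracter in "nN"
--
-- def problema_4(texto):
--         cont_letras = 0
--         hay_an = False
--         palabras_pto_4 = 0
--         caracter_anterior = " "
--         caracter_anterior_2 = " "
--         for caracter in texto:
--             if caracter != " " and caracter != ".":
--                 cont_letras += 1
--                 if es_a(caracter_anterior) and es_n(caracter):
--                     hay_an = True
--             else:
--                 if hay_an: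
--                     palabras_pto_4 += 1
--                 if caracter_anterior_2 == "a" and caracter_anterior == "n" :
--                     palabras_pto_4 = palabras_pto_4 - 1
--                 cont_letras = 0
--                 hay_an = False
--             caracter_anterior_2 = caracter_anterior
--             caracter_anterior = caracter
--
--         return palabras_pto_4
-- ===== SOURCE B (Python) =====
-- def problema_4(texto):
--     total = 0
--     word = ""
--     for ch in texto:
--         if ch == " " or ch == ".":
--             if "an" in word.lower():
--                 total += 1
--             if word.endswith("an"):
--                 total -= 1
--             word = ""
--         else:
--             word += ch
--     return total
-- ===== Notes on version B (the rewrite author's own statement) =====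
-- stated objective: simpler
-- what changed: A tracks a three-character sliding state machine (hay_an flag plus the last two characters) across the whole text; B accumulates each word and, at every space/period delimiter, classifies the finished word with whole-word string tests: +1 if 'an' occurs in word.lower(), -1 if word ends with lowercase 'an' (a trailing word with no delimiter after it is never counted, as in A).
import Mathlib
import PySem

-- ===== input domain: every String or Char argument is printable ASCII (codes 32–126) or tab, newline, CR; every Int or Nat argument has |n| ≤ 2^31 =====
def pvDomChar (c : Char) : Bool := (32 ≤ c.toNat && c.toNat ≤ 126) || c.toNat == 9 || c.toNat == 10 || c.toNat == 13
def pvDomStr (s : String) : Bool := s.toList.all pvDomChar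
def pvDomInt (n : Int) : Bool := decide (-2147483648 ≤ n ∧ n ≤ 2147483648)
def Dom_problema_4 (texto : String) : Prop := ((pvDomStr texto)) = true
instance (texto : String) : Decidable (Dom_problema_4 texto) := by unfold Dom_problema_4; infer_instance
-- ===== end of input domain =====

-- B replaces A's three-character sliding state machine by accumulating each word and
-- classifying it with whole-word string tests ('an' in word.lower() / word.endswith('an')); objective: simpler.

-- ===== PORT A =====
def es_a (caracter : Char) : Bool := PySem.Chars.isIn [caracter] ['a', 'A']

def es_n (caracter : Char) : Bool := PySem.Chars.isIn [caracter] ['n', 'N']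

-- loop body of A's for-loop; state = (cont_letras, hay_an, palabras_pto_4, caracter_anterior, caracter_anterior_2)
def pasoA (st : Int × Bool × Int × Char × Char) (caracter : Char) : Int × Bool × Int × Char × Char :=
  let cont_letras := st.1
  let hay_an := st.2.1
  let palabras := st.2.2.1
  let prev := st.2.2.2.1
  let prev2 := st.2.2.2.2
  if caracter != ' ' && caracter != '.' then
    (cont_letras + 1, hay_an || (es_a prev && es_n caracter), palabras, caracter, prev)
  else
    let p1 := if hay_an then palabras + 1 else palabras
    let p2 := if prev2 == 'a' && prev == 'n' then p1 - 1 else p1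
    (0, false, p2, caracter, prev)

def problema_4 (texto : String) : Int :=
  (texto.toList.foldl pasoA (0, false, 0, ' ', ' ')).2.2.1

-- ===== PORT B =====
-- loop body of B's for-loop; state = (total, word)
def pasoB (st : Int × List Char) (ch : Char) : Int × List Char :=
  let total := st.1
  let word := st.2
  if ch == ' ' || ch == '.' then
    let t1 := if PySem.Chars.isIn ['a', 'n'] (PySem.Chars.lower word) then total + 1 else total
    let t2 := if PySem.Chars.endswith word ['a', 'n'] then t1 - 1 else t1
    (t2, ([] : List Char))
  else
    (total, word ++ [ch])

def problema_4_alt (texto : String) : Int :=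
  (texto.toList.foldl pasoB (0, [])).1

-- ===== PRECONDITION & SPEC =====
def Spec_problema_4 (texto : String) (out : Int) : Prop := out = problema_4_alt texto
instance (texto : String) (out : Int) : Decidable (Spec_problema_4 texto out) := by unfold Spec_problema_4; infer_instance

-- ===== CLAIM (what is proved, stated in full; the proofs are below) =====
def Claim_equal_problema_4 : Prop := ∀ (texto : String), Dom_problema_4 texto → Spec_problema_4 texto (problema_4 texto)

-- ===== LEMMAS AND PROOFS =====

theorem char_eq_iff_toNat (c d : Char) : c = d ↔ c.toNat = d.toNat :=
  eq_iff_eq_of_cmp_eq_cmp rfl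

theorem le_char_iff_toNat (c d : Char) : c ≤ d ↔ c.toNat ≤ d.toNat := Iff.rfl

theorem toNat_lowerChar (c : Char) :
    (PySem.Chars.lowerChar c).toNat =
      if 65 ≤ c.toNat ∧ c.toNat ≤ 90 then c.toNat + 32 else c.toNat := by
  simp only [PySem.Chars.lowerChar, PySem.Chars.isupper, Bool.and_eq_true, decide_eq_true_eq,
    le_char_iff_toNat]
  have h65 : ('A').toNat = 65 := rfl
  have h90 : ('Z').toNat = 90 := rfl
  rw [h65, h90]
  split_ifs with h
  · rw [Char.toNat_ofNat, if_pos (Or.inl (by omega))]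
  · rfl

theorem lowerChar_eq_a (c : Char) : (PySem.Chars.lowerChar c = 'a') ↔ (c = 'a' ∨ c = 'A') := by
  rw [char_eq_iff_toNat, char_eq_iff_toNat, char_eq_iff_toNat, toNat_lowerChar]
  show _ = 97 ↔ c.toNat = 97 ∨ c.toNat = 65
  split_ifs with h <;> omega

theorem lowerChar_eq_n (c : Char) : (PySem.Chars.lowerChar c = 'n') ↔ (c = 'n' ∨ c = 'N') := by
  rw [char_eq_iff_toNat, char_eq_iff_toNat, char_eq_iff_toNat, toNat_lowerChar]
  show _ = 110 ↔ c.toNat = 110 ∨ c.toNat = 78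
  split_ifs with h <;> omega

theorem es_a_iff (c : Char) : es_a c = true ↔ (c = 'a' ∨ c = 'A') := by
  rw [es_a, PySem.Chars.isIn_iff_infix]
  constructor
  · intro h
    have hm : c ∈ ['a', 'A'] := h.subset (by simp)
    simpa using hm
  · rintro (rfl | rfl) <;> decide

theorem es_n_iff (c : Char) : es_n c = true ↔ (c = 'n' ∨ c = 'N') := by
  rw [es_n, PySem.Chars.isIn_iff_infix]
  constructor
  · intro h
    have hm : c ∈ ['n', 'N'] := h.subset (by simp)
    simpa using hm
  · rintro (rfl | rfl) <;> decide

-- proof-side reference: does the word contain an adjacent a/A followed by n/N?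
def hasAN : List Char → Bool
  | a :: b :: t => (es_a a && es_n b) || hasAN (b :: t)
  | _ => false

def isDelim (c : Char) : Prop := c = ' ' ∨ c = '.'

-- correspondence between A's rolling (hay_an, prev, prev2) and B's accumulated word
def LoopInv (w : List Char) (hay : Bool) (prev prev2 : Char) : Prop :=
  hay = hasAN w ∧
  match w.reverse with
  | [] => isDelim prev
  | [c] => prev = c ∧ isDelim prev2
  | c :: c2 :: _ => prev = c ∧ prev2 = c2

theorem hasAN_append (w : List Char) (c : Char) :
    hasAN (w ++ [c]) = (hasAN w || (es_a (w.getLastD ' ') && es_n c)) := by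
  induction w with
  | nil =>
    show hasAN [c] = (hasAN [] || (es_a ' ' && es_n c))
    rw [show es_a ' ' = false by decide]
    simp [hasAN]
  | cons x w ih =>
    cases w with
    | nil =>
      show hasAN [x, c] = (hasAN [x] || (es_a x && es_n c))
      show ((es_a x && es_n c) || hasAN [c]) = _
      simp [hasAN]
    | cons y t =>
      show hasAN (x :: y :: (t ++ [c])) = _
      rw [hasAN]
      have h : (y :: t) ++ [c] = y :: (t ++ [c]) := rfl
      rw [← h, ih]
      simp [hasAN, Bool.or_assoc]

theorem isIn_lower_eq_hasAN (w : List Char) :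
    PySem.Chars.isIn ['a', 'n'] (PySem.Chars.lower w) = hasAN w := by
  induction w with
  | nil => decide
  | cons x w ih =>
    cases w with
    | nil =>
      rw [show hasAN [x] = false from rfl, Bool.eq_false_iff]
      intro h
      have h2 := (PySem.Chars.isIn_iff_infix _ _).mp h
      have := h2.length_le
      simp [PySem.Chars.lower] at this
    | cons y t =>
      rw [show hasAN (x :: y :: t) = ((es_a x && es_n y) || hasAN (y :: t)) from rfl, ← ih]
      rw [Bool.eq_iff_iff, PySem.Chars.isIn_iff_infix]
      simp only [PySem.Chars.lower, List.map_cons]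
      rw [List.infix_cons_iff, List.cons_prefix_cons, List.cons_prefix_cons]
      have hih : ['a', 'n'] <:+: PySem.Chars.lowerChar y :: List.map PySem.Chars.lowerChar t ↔
          PySem.Chars.isIn ['a', 'n'] (PySem.Chars.lower (y :: t)) = true := by
        rw [PySem.Chars.isIn_iff_infix]
        simp [PySem.Chars.lower]
      rw [hih]
      simp only [Bool.or_eq_true, Bool.and_eq_true, es_a_iff, es_n_iff]
      constructor
      · rintro (⟨ha, hn, -⟩ | h)
        · exact Or.inl ⟨(lowerChar_eq_a x).mp ha.symm, (lowerChar_eq_n y).mp hn.symm⟩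
        · exact Or.inr h
      · rintro (⟨ha, hn⟩ | h)
        · exact Or.inl ⟨((lowerChar_eq_a x).mpr ha).symm, ((lowerChar_eq_n y).mpr hn).symm, List.nil_prefix⟩
        · exact Or.inr h

theorem endswith_an (w : List Char) :
    PySem.Chars.endswith w ['a', 'n'] =
      (match w.reverse with
       | c :: c2 :: _ => c == 'n' && c2 == 'a'
       | _ => false) := by
  rcases hw : w.reverse with _ | ⟨c, rest⟩
  · have hwnil : w = [] := by simpa using congrArg List.reverse hw
    subst hwnil
    decide
  · rcases rest with _ | ⟨c2, rest⟩
    · have hw1 : w = [c] := by simpa using congrArg List.reverse hw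
      subst hw1
      show PySem.Chars.endswith [c] ['a', 'n'] = false
      rw [Bool.eq_false_iff]
      intro h
      have := ((PySem.Chars.endswith_iff _ _).mp h).length_le
      simp at this
    · show PySem.Chars.endswith w ['a', 'n'] = (c == 'n' && c2 == 'a')
      rw [Bool.eq_iff_iff, PySem.Chars.endswith_iff, ← List.reverse_prefix, hw]
      show ['n', 'a'] <+: c :: c2 :: rest ↔ _
      rw [List.cons_prefix_cons, List.cons_prefix_cons]
      simp only [Bool.and_eq_true, beq_iff_eq, List.nil_prefix, and_true]
      exact ⟨fun ⟨h1, h2⟩ => ⟨h1.symm, h2.symm⟩, fun ⟨h1, h2⟩ => ⟨h1.symm, h2.symm⟩⟩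

theorem getLastD_of_reverse (w : List Char) (c : Char) (rest : List Char) (d : Char)
    (hw : w.reverse = c :: rest) : w.getLastD d = c := by
  have hwv : w = (c :: rest).reverse := by simpa using congrArg List.reverse hw
  subst hwv
  simp

theorem isDelim_not_es_a (c : Char) (h : isDelim c) : es_a c = false := by
  rcases h with rfl | rfl <;> decide

theorem isDelim_ne_n (c : Char) (h : isDelim c) : (c == 'n') = false := by
  rcases h with rfl | rfl <;> decide

theorem isDelim_ne_a (c : Char) (h : isDelim c) : (c == 'a') = false := by
  rcases h with rfl | rfl <;> decide

theorem loop_eq (cs : List Char) : ∀ (w : List Char) (hay : Bool) (prev prev2 : Char)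
    (cont pal : Int), LoopInv w hay prev prev2 →
    (cs.foldl pasoA (cont, hay, pal, prev, prev2)).2.2.1 = (cs.foldl pasoB (pal, w)).1 := by
  induction cs with
  | nil => intro w hay prev prev2 cont pal _; rfl
  | cons c cs ih =>
    intro w hay prev prev2 cont pal hinv
    obtain ⟨hhay, hmatch⟩ := hinv
    by_cases hc : c = ' ' ∨ c = '.'
    · -- delimiter step: both sides close the current word
      have hcondA : (c != ' ' && c != '.') = false := by
        rcases hc with rfl | rfl <;> decide
      have hcondB : (c == ' ' || c == '.') = true := by
        rcases hc with rfl | rfl <;> decide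
      rw [List.foldl_cons, List.foldl_cons]
      rw [show pasoA (cont, hay, pal, prev, prev2) c =
            (0, false,
              (if prev2 == 'a' && prev == 'n' then
                 (if hay then pal + 1 else pal) - 1 else (if hay then pal + 1 else pal)),
              c, prev) by simp only [pasoA, hcondA]; rfl]
      rw [show pasoB (pal, w) c =
            ((if PySem.Chars.endswith w ['a', 'n'] then
                (if PySem.Chars.isIn ['a', 'n'] (PySem.Chars.lower w) then pal + 1 else pal) - 1
              else (if PySem.Chars.isIn ['a', 'n'] (PySem.Chars.lower w) then pal + 1 else pal)),
             ([] : List Char)) by simp only [pasoB, hcondB]; rfl]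
      have hisin : PySem.Chars.isIn ['a', 'n'] (PySem.Chars.lower w) = hay := by
        rw [isIn_lower_eq_hasAN, hhay]
      have hend : PySem.Chars.endswith w ['a', 'n'] = (prev2 == 'a' && prev == 'n') := by
        rw [endswith_an]
        rcases hw : w.reverse with _ | ⟨c1, rest⟩
        · rw [hw] at hmatch
          rw [isDelim_ne_n prev hmatch, Bool.and_false]
        · rcases rest with _ | ⟨c2, rest⟩
          · rw [hw] at hmatch
            rw [isDelim_ne_a prev2 hmatch.2, Bool.false_and]
          · rw [hw] at hmatch
            rw [hmatch.1, hmatch.2, Bool.and_comm]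
      rw [hisin, hend]
      exact ih [] false c prev 0 _ ⟨rfl, hc⟩
    · -- ordinary character: both sides extend the current word
      push Not at hc
      have hcondA : (c != ' ' && c != '.') = true := by
        simp [hc.1, hc.2]
      have hcondB : (c == ' ' || c == '.') = false := by
        simp [hc.1, hc.2]
      rw [List.foldl_cons, List.foldl_cons]
      rw [show pasoA (cont, hay, pal, prev, prev2) c =
            (cont + 1, hay || (es_a prev && es_n c), pal, c, prev) by
          simp only [pasoA, hcondA]; rfl]
      rw [show pasoB (pal, w) c = (pal, w ++ [c]) by simp only [pasoB, hcondB]; rfl]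
      apply ih (w ++ [c]) _ c prev (cont + 1) pal
      constructor
      · rw [hasAN_append, hhay]
        rcases hw : w.reverse with _ | ⟨c1, rest⟩
        · have hwnil : w = [] := by simpa using congrArg List.reverse hw
          rw [hw] at hmatch
          rw [isDelim_not_es_a prev hmatch, hwnil]
          rw [show ([] : List Char).getLastD ' ' = ' ' from rfl, show es_a ' ' = false by decide]
        · rw [hw] at hmatch
          have hp : prev = c1 := by
            rcases rest with _ | ⟨c2, rest⟩
            · exact hmatch.1
            · exact hmatch.1
          rw [getLastD_of_reverse w c1 rest ' ' hw, hp]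
      · show (match (w ++ [c]).reverse with
          | [] => isDelim c
          | [d] => c = d ∧ isDelim prev
          | d :: d2 :: _ => c = d ∧ prev = d2)
        rw [show (w ++ [c]).reverse = c :: w.reverse by simp]
        rcases hw : w.reverse with _ | ⟨c1, rest⟩
        · rw [hw] at hmatch
          exact ⟨rfl, hmatch⟩
        · rw [hw] at hmatch
          rcases rest with _ | ⟨c2, rest⟩
          · exact ⟨rfl, hmatch.1⟩
          · exact ⟨rfl, hmatch.1⟩

-- ===== VERDICT (by name: the statement is the Claim_ definition above) =====
theorem problema_4_spec : Claim_equal_problema_4 := by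
  intro texto _
  show problema_4 texto = problema_4_alt texto
  exact loop_eq texto.toList [] false ' ' ' ' 0 0 ⟨rfl, Or.inl rfl⟩
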